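-- pv_equiv track=rewrite | github.com/Inkkonu/PolytechClasses | S5_Algorithmic/pw3/pw3.py | order_odd_and_even
-- ===== SOURCE A (Python) =====
-- def order_odd_and_even(l: list[int]) -> list[int]:
--     length = len(l)
--     ll = [0] * length
--     min, max = 0, length - 1
--     for i in range(length):
--         if l[i] % 2 == 0:
--             ll[min] = l[i]
--             min += 1
--         else:
--             ll[max] = l[i]
--             max -= 1
--     return ll
-- ===== SOURCE B (Python) =====
-- def order_odd_and_even(l: list[int]) -> list[int]:
--     evens = [x for x in l if x % 2 == 0]
--     odds = [x for x in l if x % 2 != 0]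
--     return evens + odds[::-1]
-- ===== Notes on version B (the rewrite author's own statement) =====
-- stated objective: simpler
-- what changed: Replaces the preallocated buffer with two-pointer in-place fills (min from the front for evens, max from the back for odds) by two filtering passes building evens and odds separately, returned as evens + reversed(odds).
import Mathlib
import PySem

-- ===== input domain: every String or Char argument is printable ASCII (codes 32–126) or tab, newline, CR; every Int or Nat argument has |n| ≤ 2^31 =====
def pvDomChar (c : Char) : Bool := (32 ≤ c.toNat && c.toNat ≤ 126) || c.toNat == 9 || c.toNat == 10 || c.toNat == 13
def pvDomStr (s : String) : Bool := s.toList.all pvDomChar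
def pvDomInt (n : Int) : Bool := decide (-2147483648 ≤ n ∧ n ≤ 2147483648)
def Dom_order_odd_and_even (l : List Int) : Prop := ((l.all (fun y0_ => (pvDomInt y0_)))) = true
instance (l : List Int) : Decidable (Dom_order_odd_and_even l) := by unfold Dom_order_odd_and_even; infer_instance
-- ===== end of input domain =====

-- B replaces A's single-pass two-pointer in-place fill of a preallocated buffer by two
-- filtering passes (evens in order, odds in order) concatenated as evens ++ reverse odds;
-- objective: simpler.

-- ===== PORT A =====
-- A's for-loop over range(length) reading l[i], carried as a structural recursion over the
-- elements with state (ll, min, max); ll[min]=... / ll[max]=... is PySem.List.pySetD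
-- (exact Python index assignment, including negative wraparound, though min/max stay in range here).
def oddEvenLoop (rest ll : List Int) (mn mx : Int) : List Int :=
  match rest with
  | [] => ll
  | x :: rs =>
    if PySem.Int.mod x 2 == 0 then
      oddEvenLoop rs (PySem.List.pySetD ll mn x) (mn + 1) mx
    else
      oddEvenLoop rs (PySem.List.pySetD ll mx x) mn (mx - 1)

def order_odd_and_even (l : List Int) : List Int :=
  oddEvenLoop l (List.replicate l.length 0) 0 ((l.length : Int) - 1)

-- ===== PORT B =====
def order_odd_and_even_alt (l : List Int) : List Int :=
  (l.filter (fun x => PySem.Int.mod x 2 == 0)) ++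
    (l.filter (fun x => !(PySem.Int.mod x 2 == 0))).reverse

-- ===== PRECONDITION & SPEC =====
def Spec_order_odd_and_even (l : List Int) (out : List Int) : Prop := out = order_odd_and_even_alt l
instance (l : List Int) (out : List Int) : Decidable (Spec_order_odd_and_even l out) := by unfold Spec_order_odd_and_even; infer_instance

-- ===== CLAIM (what is proved, stated in full; the proofs are below) =====
def Claim_equal_order_odd_and_even : Prop := ∀ (l : List Int), Dom_order_odd_and_even l → Spec_order_odd_and_even l (order_odd_and_even l)

-- ===== LEMMAS AND PROOFS =====

lemma set_append_add (E : List Int) (n : Nat) (t : List Int) (x : Int) :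
    (E ++ t).set (E.length + n) x = E ++ t.set n x := by
  induction E with
  | nil => simp
  | cons a E ih =>
    simp only [List.cons_append, List.length_cons]
    rw [show E.length + 1 + n = (E.length + n) + 1 from by omega]
    simp [List.set, ih]

lemma set_replicate_last (k : Nat) (O : List Int) (x : Int) :
    (List.replicate (k + 1) (0 : Int) ++ O).set k x = List.replicate k (0 : Int) ++ (x :: O) := by
  induction k with
  | zero => simp [List.replicate]
  | succ k ih =>
    rw [show k + 1 + 1 = (k + 1) + 1 from rfl, List.replicate_succ (n := k + 1)]
    simpa [List.replicate_succ] using ih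

lemma set_append_len (E t : List Int) (x : Int) :
    (E ++ t).set E.length x = E ++ t.set 0 x := by
  have h := set_append_add E 0 t x
  simp only [Nat.add_zero] at h
  exact h

lemma oddEvenLoop_inv (rest : List Int) : ∀ (E O : List Int),
    oddEvenLoop rest (E ++ List.replicate rest.length 0 ++ O) (E.length : Int)
        ((E.length : Int) + rest.length - 1)
      = E ++ rest.filter (fun x => PySem.Int.mod x 2 == 0) ++
          ((rest.filter (fun x => !(PySem.Int.mod x 2 == 0))).reverse ++ O) := by
  induction rest with
  | nil => intro E O; simp [oddEvenLoop]
  | cons x rs ih =>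
    intro E O
    by_cases h : PySem.Int.mod x 2 == 0
    · -- even: write at index min = E.length, then min+1
      have hset : PySem.List.pySetD (E ++ List.replicate (x :: rs).length 0 ++ O) (E.length : Int) x
          = (E ++ [x]) ++ List.replicate rs.length 0 ++ O := by
        rw [PySem.List.pySetD_of_nonneg _ _ (Int.natCast_nonneg _)]
        simp only [Int.toNat_natCast, List.append_assoc]
        rw [set_append_len]
        simp [List.replicate_succ]
      have hmx : (E.length : Int) + (x :: rs).length - 1
          = ((E ++ [x]).length : Int) + rs.length - 1 := by
        simp only [List.length_cons, List.length_append, List.length_nil]; push_cast; ring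
      simp only [oddEvenLoop, h, if_pos, hset, hmx]
      rw [show (E.length : Int) + 1 = (((E ++ [x]).length : Nat) : Int) by simp]
      rw [ih (E ++ [x]) O]
      rw [List.filter_cons_of_pos (p := fun y => PySem.Int.mod y 2 == 0) h,
          List.filter_cons_of_neg (p := fun y => !(PySem.Int.mod y 2 == 0))
            (by simp only [h, Bool.not_true, Bool.false_eq_true, not_false_eq_true])]
      simp [List.append_assoc]
    · -- odd: write at index max = E.length + rs.length, then max-1
      have hmxval : (E.length : Int) + (x :: rs).length - 1
          = ((E.length + rs.length : Nat) : Int) := by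
        simp only [List.length_cons]; push_cast; ring
      have hset : PySem.List.pySetD (E ++ List.replicate (x :: rs).length 0 ++ O)
            ((E.length : Int) + (x :: rs).length - 1) x
          = E ++ List.replicate rs.length 0 ++ (x :: O) := by
        rw [hmxval, PySem.List.pySetD_of_nonneg _ _ (Int.natCast_nonneg _)]
        simp only [Int.toNat_natCast, List.append_assoc]
        rw [set_append_add]
        rw [show (x :: rs).length = rs.length + 1 from rfl, set_replicate_last]
      have hmx' : (E.length : Int) + (x :: rs).length - 1 - 1
          = (E.length : Int) + rs.length - 1 := by
        simp only [List.length_cons]; push_cast; ring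
      simp only [oddEvenLoop, h, if_neg, Bool.false_eq_true, not_false_eq_true, hset, hmx']
      rw [ih E (x :: O)]
      rw [List.filter_cons_of_neg (p := fun y => PySem.Int.mod y 2 == 0) h,
          List.filter_cons_of_pos (p := fun y => !(PySem.Int.mod y 2 == 0))
            (by simp only [Bool.not_eq_true] at h; simp only [h, Bool.not_false])]
      simp [List.append_assoc]

-- ===== VERDICT (by name: the statement is the Claim_ definition above) =====
theorem order_odd_and_even_spec : Claim_equal_order_odd_and_even := by
  intro l _
  unfold Spec_order_odd_and_even order_odd_and_even order_odd_and_even_alt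
  have := oddEvenLoop_inv l [] []
  simpa using this
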